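-- pv_equiv track=rewrite | github.com/ohiliazov/sgf-analyzer | problem_parser.py | to_stone_array
-- ===== SOURCE A (Python) =====
-- OFF_BOARD = 4
--
-- def to_stone_array(numbers: list, board_size: int = 19):
--     stones = []
--     i = 0
--     for x in range(board_size + 2):
--         for y in range(board_size + 2):
--             if x == 0 or x == board_size + 1 or y == 0 or y == board_size + 1:
--                 stones.append(OFF_BOARD)
--             else:
--                 stones.append(numbers[i])
--                 i += 1
--
--     return stones
-- ===== SOURCE B (Python) =====
-- OFF_BOARD = 4
--
--
-- def to_stone_array(numbers: list, board_size: int = 19):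
--     border = [OFF_BOARD] * (board_size + 2)
--     stones = list(border)
--     for x in range(board_size):
--         stones += [OFF_BOARD] + [numbers[x * board_size + y] for y in range(board_size)] + [OFF_BOARD]
--     return stones + border
-- ===== Notes on version B (the rewrite author's own statement) =====
-- stated objective: alternative
-- what changed: A runs one uniform (board_size+2)^2 cell loop with a border test and a running cursor into numbers; B builds the grid row by row: a precomputed full border row, then for each interior row a border cell, a comprehension reading numbers[x*board_size+y] by explicit index, and a border cell, then the border row again.
-- intended difference: On the nonsense input board_size = -1 A returns a single OFF_BOARD cell (its x == board_size+1 border test collapses onto x == 0), while B returns its natural one-cell top and bottom border rows, i.e. two OFF_BOARD cells; neither is specified for a negative size and B's row-by-row value is the intended one. — e.g. on to_stone_array([], -1): A returns [4], B returns [4, 4]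
import Mathlib
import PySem

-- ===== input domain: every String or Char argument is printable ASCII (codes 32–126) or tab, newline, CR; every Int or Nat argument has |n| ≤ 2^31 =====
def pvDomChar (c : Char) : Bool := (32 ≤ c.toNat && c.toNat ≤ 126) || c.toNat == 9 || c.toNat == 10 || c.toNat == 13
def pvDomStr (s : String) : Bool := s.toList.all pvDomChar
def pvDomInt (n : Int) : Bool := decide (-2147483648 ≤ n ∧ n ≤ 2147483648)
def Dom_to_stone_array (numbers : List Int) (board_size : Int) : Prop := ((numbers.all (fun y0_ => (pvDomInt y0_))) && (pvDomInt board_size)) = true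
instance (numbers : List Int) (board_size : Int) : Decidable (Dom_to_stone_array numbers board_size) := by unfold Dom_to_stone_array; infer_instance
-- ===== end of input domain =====

-- B builds the bordered grid row by row (border row, then per-row border/indexed-interior/border)
-- instead of A's single uniform cell loop with a border test and running cursor; same cost, different decomposition.

-- ===== PORT A =====
def to_stone_array (numbers : List Int) (board_size : Int) : List Int :=
  (((PySem.List.pyRange 0 (board_size + 2)).foldl (fun (st : List Int × Int) x =>
      (PySem.List.pyRange 0 (board_size + 2)).foldl (fun (st : List Int × Int) y =>
        if x = 0 ∨ x = board_size + 1 ∨ y = 0 ∨ y = board_size + 1 then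
          (st.1 ++ [4], st.2)
        else
          (st.1 ++ [PySem.List.pyGetD numbers st.2 0], st.2 + 1)) st)
    (([] : List Int), (0 : Int))).1)

-- ===== PORT B =====
def to_stone_array_alt (numbers : List Int) (board_size : Int) : List Int :=
  let border : List Int := List.replicate (board_size + 2).toNat 4
  let stones := (PySem.List.pyRange 0 board_size).foldl (fun acc x =>
    acc ++ ([4] ++ (PySem.List.pyRange 0 board_size).map
      (fun y => PySem.List.pyGetD numbers (x * board_size + y) 0) ++ [4])) border
  stones ++ border

-- ===== PRECONDITION & SPEC =====
-- Pre_ excludes exactly the inputs with 0 < board_size and fewer than board_size^2 numbers,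
-- on which A raises IndexError.
def Pre_to_stone_array (numbers : List Int) (board_size : Int) : Prop :=
  board_size < 0 ∨ board_size * board_size ≤ (numbers.length : Int)
instance (numbers : List Int) (board_size : Int) : Decidable (Pre_to_stone_array numbers board_size) := by unfold Pre_to_stone_array; infer_instance

def pvWitness_to_stone_array : List Int × Int := ([1, 0, 2, 3], 2)

-- On the nonsense input board_size = -1 A returns a single leftover OFF_BOARD cell (an accident of
-- its x == board_size + 1 border test collapsing onto x == 0), while B returns its natural one-cell
-- top and bottom border rows, two OFF_BOARD cells; neither value is specified, B's is the intended one.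
def D_to_stone_array (numbers : List Int) (board_size : Int) : Prop := board_size = -1
instance (numbers : List Int) (board_size : Int) : Decidable (D_to_stone_array numbers board_size) := by unfold D_to_stone_array; infer_instance

def Spec_to_stone_array (numbers : List Int) (board_size : Int) (out : List Int) : Prop := ¬ D_to_stone_array numbers board_size → out = to_stone_array_alt numbers board_size
instance (numbers : List Int) (board_size : Int) (out : List Int) : Decidable (Spec_to_stone_array numbers board_size out) := by unfold Spec_to_stone_array; infer_instance

def pvDiffWitness_to_stone_array : List Int × Int := ([], -1)
def pvDiffWitnessOut_to_stone_array : (List Int) × (List Int) := ([4], [4, 4])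

-- ===== CLAIM (what is proved, stated in full; the proofs are below) =====
def Claim_unchanged_to_stone_array : Prop := ∀ (numbers : List Int) (board_size : Int), Dom_to_stone_array numbers board_size → Pre_to_stone_array numbers board_size → Spec_to_stone_array numbers board_size (to_stone_array numbers board_size)
def Claim_changed_to_stone_array : Prop := Dom_to_stone_array (pvDiffWitness_to_stone_array.1) (pvDiffWitness_to_stone_array.2) ∧ Pre_to_stone_array (pvDiffWitness_to_stone_array.1) (pvDiffWitness_to_stone_array.2) ∧ D_to_stone_array (pvDiffWitness_to_stone_array.1) (pvDiffWitness_to_stone_array.2) ∧ to_stone_array (pvDiffWitness_to_stone_array.1) (pvDiffWitness_to_stone_array.2) = pvDiffWitnessOut_to_stone_array.1 ∧ to_stone_array_alt (pvDiffWitness_to_stone_array.1) (pvDiffWitness_to_stone_array.2) = pvDiffWitnessOut_to_stone_array.2 ∧ pvDiffWitnessOut_to_stone_array.1 ≠ pvDiffWitnessOut_to_stone_array.2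
def Claim_exact_to_stone_array : Prop := ∀ (numbers : List Int) (board_size : Int), Dom_to_stone_array numbers board_size → Pre_to_stone_array numbers board_size → D_to_stone_array numbers board_size → to_stone_array numbers board_size ≠ to_stone_array_alt numbers board_size

-- ===== LEMMAS AND PROOFS =====

-- one interior row of the bordered grid, whose interior cells start at cursor i
def pvRow (numbers : List Int) (n : Nat) (i : Int) : List Int :=
  [4] ++ (List.range n).map (fun (y : Nat) => PySem.List.pyGetD numbers (i + (y : Int)) 0) ++ [4]

-- closed form both ports are reduced to
def pvGrid (numbers : List Int) (n : Nat) : List Int :=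
  List.replicate (n + 2) 4
    ++ (List.range n).flatMap (fun (j : Nat) => pvRow numbers n ((j : Int) * (n : Int)))
    ++ List.replicate (n + 2) 4

-- the index list range(board_size + 2), split as border / interior / border indices
def pvIdx (n : Nat) : List Int :=
  0 :: ((List.range n).map (fun (j : Nat) => ((j : Int) + 1)) ++ [(n : Int) + 1])

theorem pv_pyRange_eq (n : Nat) : PySem.List.pyRange 0 ((n : Int) + 2) = pvIdx n := by
  rw [show ((n : Int) + 2) = ((n + 2 : Nat) : Int) by push_cast; ring,
    PySem.List.pyRange_zero_natCast,
    show n + 2 = (n + 1) + 1 from rfl, List.range_succ_eq_map, List.range_succ]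
  simp only [pvIdx, List.map_cons, List.map_append, List.map_map, Nat.cast_zero, List.map_nil]
  push_cast
  rfl

-- the pure border-appending fold
theorem pv_fold_border (L : List Int) (acc : List Int) (i : Int) :
    L.foldl (fun (st : List Int × Int) _ => (st.1 ++ [(4 : Int)], st.2)) (acc, i)
      = (acc ++ List.replicate L.length 4, i) := by
  induction L generalizing acc with
  | nil => simp
  | cons y ys ih =>
      rw [List.foldl_cons, ih]
      simp [List.replicate_succ, List.append_assoc]

-- the pure interior-reading fold
theorem pv_fold_interior (numbers : List Int) (L : List Int) (acc : List Int) (i : Int) :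
    L.foldl (fun (st : List Int × Int) _ =>
        (st.1 ++ [PySem.List.pyGetD numbers st.2 0], st.2 + 1)) (acc, i)
      = (acc ++ (List.range L.length).map (fun (y : Nat) => PySem.List.pyGetD numbers (i + (y : Int)) 0),
         i + (L.length : Int)) := by
  induction L generalizing acc i with
  | nil => simp
  | cons y ys ih =>
      rw [List.foldl_cons, ih]
      rw [Prod.mk.injEq]
      refine ⟨?_, by push_cast [List.length_cons]; ring⟩
      simp only [List.length_cons, List.range_succ_eq_map, List.map_cons, List.map_map,
        List.append_assoc, List.singleton_append]
      congr 2
      · simp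
      · apply List.map_congr_left
        intro k _
        simp only [Function.comp]
        congr 1
        push_cast
        ring

-- inner loop for a border row index x
theorem pv_inner_border (numbers : List Int) (n : Nat) (x : Int) (acc : List Int) (i : Int)
    (hx : x = 0 ∨ x = (n : Int) + 1) :
    (pvIdx n).foldl (fun (st : List Int × Int) y =>
        if x = 0 ∨ x = (n : Int) + 1 ∨ y = 0 ∨ y = (n : Int) + 1 then
          (st.1 ++ [4], st.2)
        else
          (st.1 ++ [PySem.List.pyGetD numbers st.2 0], st.2 + 1)) (acc, i)
      = (acc ++ List.replicate (n + 2) 4, i) := by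
  rw [PySem.List.foldl_congr_mem _ _ (fun (st : List Int × Int) _ => (st.1 ++ [(4 : Int)], st.2)) _
    (by intro st y _
        rw [if_pos]
        rcases hx with h | h
        · exact Or.inl h
        · exact Or.inr (Or.inl h))]
  rw [pv_fold_border]
  simp [pvIdx]

-- inner loop for an interior row index x (1 ≤ x ≤ n)
theorem pv_inner_interior (numbers : List Int) (n : Nat) (x : Int) (acc : List Int) (i : Int)
    (hx1 : 1 ≤ x) (hx2 : x ≤ (n : Int)) :
    (pvIdx n).foldl (fun (st : List Int × Int) y =>
        if x = 0 ∨ x = (n : Int) + 1 ∨ y = 0 ∨ y = (n : Int) + 1 then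
          (st.1 ++ [4], st.2)
        else
          (st.1 ++ [PySem.List.pyGetD numbers st.2 0], st.2 + 1)) (acc, i)
      = (acc ++ pvRow numbers n i, i + (n : Int)) := by
  simp only [pvIdx, List.foldl_cons, List.foldl_append]
  rw [if_pos (by norm_num)]
  rw [PySem.List.foldl_congr_mem ((List.range n).map (fun (j : Nat) => ((j : Int) + 1))) _
      (fun (st : List Int × Int) _ => (st.1 ++ [PySem.List.pyGetD numbers st.2 0], st.2 + 1)) _
    (by intro st y hy
        obtain ⟨k, hk, rfl⟩ := List.mem_map.mp hy
        have hkn : k < n := List.mem_range.mp hk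
        rw [if_neg (by omega)])]
  rw [pv_fold_interior]
  simp only [List.length_map, List.length_range, List.foldl_nil]
  rw [if_pos (show x = 0 ∨ x = (n : Int) + 1 ∨ True ∨ (0 : Int) = (n : Int) + 1
    from Or.inr (Or.inr (Or.inl trivial)))]
  simp [pvRow, List.append_assoc]

-- the outer loop over the first m interior rows
theorem pv_outer_mid (numbers : List Int) (n m : Nat) (hm : m ≤ n) (acc : List Int) (i : Int) :
    ((List.range m).map (fun (j : Nat) => ((j : Int) + 1))).foldl (fun (st : List Int × Int) x =>
        (pvIdx n).foldl (fun (st : List Int × Int) y =>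
          if x = 0 ∨ x = (n : Int) + 1 ∨ y = 0 ∨ y = (n : Int) + 1 then
            (st.1 ++ [4], st.2)
          else
            (st.1 ++ [PySem.List.pyGetD numbers st.2 0], st.2 + 1)) st) (acc, i)
      = (acc ++ (List.range m).flatMap (fun (j : Nat) => pvRow numbers n (i + (j : Int) * (n : Int))),
         i + (m : Int) * (n : Int)) := by
  induction m generalizing acc i with
  | zero => simp
  | succ m ih =>
      rw [List.range_succ, List.map_append, List.foldl_append, ih (by omega)]
      simp only [List.map_cons, List.map_nil, List.foldl_cons, List.foldl_nil]
      rw [pv_inner_interior numbers n _ _ _ (by omega) (by omega)]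
      rw [Prod.mk.injEq]
      refine ⟨?_, by push_cast; ring⟩
      simp [List.flatMap_append, List.append_assoc]

-- splitting a fold over the index list into its border / interior / border parts
theorem pv_fold_split (n : Nat) (F : (List Int × Int) → Int → (List Int × Int))
    (init : List Int × Int) :
    (pvIdx n).foldl F init
      = F (((List.range n).map (fun (j : Nat) => ((j : Int) + 1))).foldl F (F init 0)) ((n : Int) + 1) := by
  simp [pvIdx, List.foldl_append]

-- A reduces to the closed form
theorem pv_A_eq_grid (numbers : List Int) (n : Nat) :
    to_stone_array numbers (n : Int) = pvGrid numbers n := by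
  unfold to_stone_array
  rw [pv_pyRange_eq, pv_fold_split]
  rw [pv_inner_border numbers n 0 [] 0 (Or.inl rfl)]
  rw [pv_outer_mid numbers n n le_rfl]
  rw [pv_inner_border numbers n _ _ _ (Or.inr rfl)]
  simp [pvGrid, List.append_assoc]

-- B reduces to the closed form
theorem pv_B_eq_grid (numbers : List Int) (n : Nat) :
    to_stone_array_alt numbers (n : Int) = pvGrid numbers n := by
  dsimp only [to_stone_array_alt]
  rw [show ((n : Int) + 2).toNat = n + 2 by omega]
  rw [PySem.List.pyRange_zero_natCast, PySem.List.foldl_append_eq_flatMap,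
    List.flatMap_map]
  simp only [pvGrid, List.append_assoc]
  congr 2
  congr 1
  funext j
  simp [pvRow, List.map_map, Function.comp]

-- on a negative board size past -1 both programs build nothing
theorem pv_A_nil (numbers : List Int) (b : Int) (hb : b ≤ -2) :
    to_stone_array numbers b = [] := by
  unfold to_stone_array
  rw [show PySem.List.pyRange 0 (b + 2) = [] by simp [PySem.List.pyRange]; omega]
  rfl

theorem pv_B_nil (numbers : List Int) (b : Int) (hb : b ≤ -2) :
    to_stone_array_alt numbers b = [] := by
  dsimp only [to_stone_array_alt]
  rw [show PySem.List.pyRange 0 b = [] by simp [PySem.List.pyRange]; omega]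
  simp
  omega

-- on board_size = -1, A collapses to its single border cell …
theorem pv_A_neg_one (numbers : List Int) : to_stone_array numbers (-1) = [4] := by
  unfold to_stone_array
  rw [show PySem.List.pyRange 0 ((-1) + 2) = [0] by decide]
  simp

-- … while B still emits its two (one-cell) border rows
theorem pv_B_neg_one (numbers : List Int) : to_stone_array_alt numbers (-1) = [4, 4] := by
  dsimp only [to_stone_array_alt]
  rw [show PySem.List.pyRange 0 (-1) = [] by decide]
  rfl

-- ===== VERDICT (by name: the statement is the Claim_ definition above) =====
theorem to_stone_array_spec : Claim_unchanged_to_stone_array := by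
  intro numbers board_size _ hpre hnd
  rcases le_or_gt 0 board_size with hb | hb
  · obtain ⟨n, rfl⟩ := Int.eq_ofNat_of_zero_le hb
    rw [pv_A_eq_grid, pv_B_eq_grid]
  · have hb2 : board_size ≤ -2 := by
      unfold D_to_stone_array at hnd; omega
    rw [pv_A_nil numbers board_size hb2, pv_B_nil numbers board_size hb2]

theorem to_stone_array_changed : Claim_changed_to_stone_array := by
  unfold Claim_changed_to_stone_array; decide

theorem to_stone_array_tight : Claim_exact_to_stone_array := by
  intro numbers board_size _ _ hd
  unfold D_to_stone_array at hd
  subst hd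
  rw [pv_A_neg_one, pv_B_neg_one]
  decide
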